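-- pv_equiv track=rewrite | github.com/Te-H0/Algorithm | programmers/340212.py | solution
-- ===== SOURCE A (Python) =====
-- def solution2(diffs, times, limit, level):
--     times = [0] + times
--     puzzle_size = len(diffs)
--     count = 0
--
--     for i in range(puzzle_size):
--         if diffs[i] > level:
--             count += (diffs[i] - level) * (times[i] + times[i + 1]) + times[i + 1]
--         else:
--             count += times[i + 1]
--
--     return count
--
-- def solution(diffs, times, limit):
--     answer = 0
--     right = max(diffs)
--     left = max(1, min(diffs) - 1)
--
--     while left <= right:
--         middle = (left + right) // 2
--
--         count = solution2(diffs, times, limit, middle)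
--         if count <= limit and (answer == 0 or middle < answer):
--             answer = middle
--             right = middle - 1
--         else:
--             left = middle + 1
--
--     return answer
-- ===== SOURCE B (Python) =====
-- def solution(diffs, times, limit):
--     # Sort (diff, weight) pairs and precompute suffix sums so each cost
--     # evaluation in the binary search is O(log n) instead of O(n).
--     n = len(diffs)
--     base = sum(times[:n])
--     pairs = sorted(((d, (times[i - 1] if i > 0 else 0) + times[i])
--                     for i, d in enumerate(diffs)), key=lambda p: p[0])
--     ds = [p[0] for p in pairs]
--     suff = [(0, 0)]
--     for d, w in reversed(pairs):
--         sw, sdw = suff[-1]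
--         suff.append((sw + w, sdw + d * w))
--     suff.reverse()
--
--     def cost(level):
--         # first index k with ds[k] > level (hand-rolled bisect_right)
--         lo, hi = 0, n
--         while lo < hi:
--             m = (lo + hi) // 2
--             if ds[m] > level:
--                 hi = m
--             else:
--                 lo = m + 1
--         sw, sdw = suff[lo]
--         return base + sdw - level * sw
--
--     lo, hi = max(1, min(diffs) - 1), max(diffs)
--     ans = 0
--     while lo <= hi:
--         m = (lo + hi) // 2
--         if cost(m) <= limit:
--             ans = m
--             hi = m - 1
--         else:
--             lo = m + 1
--     return ans
-- ===== Notes on version B (the rewrite author's own statement) =====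
-- stated objective: faster
-- what changed: Instead of an O(n) rescan of all puzzles for every binary-search probe, B sorts the (diff, weight) pairs once, precomputes suffix sums of weights and diff*weight, and evaluates each probe's cost with a hand-rolled bisect plus two suffix-sum lookups in O(log n).
-- outside the precondition, e.g. on solution([-1], [], 0): A returns 0, B raises IndexError
import Mathlib
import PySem

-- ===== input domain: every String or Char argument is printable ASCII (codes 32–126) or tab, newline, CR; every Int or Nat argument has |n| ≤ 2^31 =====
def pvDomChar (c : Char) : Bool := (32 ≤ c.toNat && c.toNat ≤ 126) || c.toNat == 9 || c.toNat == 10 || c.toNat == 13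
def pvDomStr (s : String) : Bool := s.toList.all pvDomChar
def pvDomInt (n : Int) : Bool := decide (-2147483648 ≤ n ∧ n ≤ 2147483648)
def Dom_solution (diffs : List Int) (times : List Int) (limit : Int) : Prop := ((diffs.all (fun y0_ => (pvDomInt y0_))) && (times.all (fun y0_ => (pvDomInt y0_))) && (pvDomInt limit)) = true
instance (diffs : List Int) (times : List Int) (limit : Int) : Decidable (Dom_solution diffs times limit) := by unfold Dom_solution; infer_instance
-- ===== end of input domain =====

-- B replaces A's O(n) rescan of all puzzles per binary-search probe by a one-time sort
-- of the (diff, weight) pairs with suffix sums, so each probe costs a bisect + lookup.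

-- ===== PORT A =====
def solution2 (diffs times : List Int) (_limit level : Int) : Int :=
  let times' := 0 :: times
  (PySem.List.pyRange 0 (diffs.length : Int) 1).foldl (fun count i =>
    if PySem.List.pyGetD diffs i 0 > level then
      count + (PySem.List.pyGetD diffs i 0 - level) *
          (PySem.List.pyGetD times' i 0 + PySem.List.pyGetD times' (i + 1) 0) +
          PySem.List.pyGetD times' (i + 1) 0
    else
      count + PySem.List.pyGetD times' (i + 1) 0) 0

-- the fuel argument only guards totality: it starts at the loop's decreasing measure
def solutionLoop (diffs times : List Int) (limit : Int) : Nat → Int → Int → Int → Int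
  | 0, _, _, answer => answer
  | fuel + 1, left, right, answer =>
    if left ≤ right then
      let middle := PySem.Int.floordiv (left + right) 2
      let count := solution2 diffs times limit middle
      if count ≤ limit ∧ (answer = 0 ∨ middle < answer) then
        solutionLoop diffs times limit fuel left (middle - 1) middle
      else
        solutionLoop diffs times limit fuel (middle + 1) right answer
    else answer

def solution (diffs : List Int) (times : List Int) (limit : Int) : Int :=
  let right := (PySem.List.max? diffs (fun x => x)).getD 0
  let left := max 1 ((PySem.List.min? diffs (fun x => x)).getD 0 - 1)
  solutionLoop diffs times limit ((right - left + 1).toNat) left right 0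

-- ===== PORT B =====
def altPairs (diffs times : List Int) : List (Int × Int) :=
  PySem.List.sorted
    ((PySem.List.enumerate diffs 0).map (fun p =>
      (p.2, (if p.1 > 0 then PySem.List.pyGetD times (p.1 - 1) 0 else 0) +
            PySem.List.pyGetD times p.1 0)))
    (fun p => p.1) false

def altSuff : List (Int × Int) → List (Int × Int)
  | [] => [(0, 0)]
  | (d, w) :: rest =>
      let acc := altSuff rest
      (acc.headI.1 + w, acc.headI.2 + d * w) :: acc

-- the fuel argument only guards totality: it starts at the loop's decreasing measure
def altBisect (ds : List Int) (level : Int) : Nat → Nat → Nat → Nat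
  | 0, lo, _ => lo
  | fuel + 1, lo, hi =>
    if lo < hi then
      let m := (lo + hi) / 2
      if PySem.List.pyGetD ds (m : Int) 0 > level then altBisect ds level fuel lo m
      else altBisect ds level fuel (m + 1) hi
    else lo

def altCost (ds : List Int) (suff : List (Int × Int)) (base : Int) (n : Nat) (level : Int) : Int :=
  let k := altBisect ds level n 0 n
  let p := PySem.List.pyGetD suff (k : Int) (0, 0)
  base + p.2 - level * p.1

-- the fuel argument only guards totality: it starts at the loop's decreasing measure
def altSearch (ds : List Int) (suff : List (Int × Int)) (base : Int) (n : Nat)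
    (limit : Int) : Nat → Int → Int → Int → Int
  | 0, _, _, ans => ans
  | fuel + 1, lo, hi, ans =>
    if lo ≤ hi then
      let m := PySem.Int.floordiv (lo + hi) 2
      if altCost ds suff base n m ≤ limit then
        altSearch ds suff base n limit fuel lo (m - 1) m
      else
        altSearch ds suff base n limit fuel (m + 1) hi ans
    else ans

def solution_alt (diffs : List Int) (times : List Int) (limit : Int) : Int :=
  let n := diffs.length
  let base := (times.take n).sum
  let pairs := altPairs diffs times
  let ds := pairs.map (fun p => p.1)
  let suff := altSuff pairs
  let lo := max 1 ((PySem.List.min? diffs (fun x => x)).getD 0 - 1)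
  let hi := (PySem.List.max? diffs (fun x => x)).getD 0
  altSearch ds suff base n limit ((hi - lo + 1).toNat) lo hi 0

-- ===== PRECONDITION & SPEC =====
-- Pre_ excludes empty diffs (max/min of [] raises ValueError) and times shorter than
-- diffs, where A raises IndexError whenever its loop runs and returns 0 only in the
-- degenerate corner max(diffs) ≤ 0 where the loop never executes; B always indexes times.
def Pre_solution (diffs : List Int) (times : List Int) (limit : Int) : Prop :=
  diffs ≠ [] ∧ diffs.length ≤ times.length
instance (diffs : List Int) (times : List Int) (limit : Int) : Decidable (Pre_solution diffs times limit) := by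
  unfold Pre_solution; infer_instance

def pvWitness_solution : List Int × List Int × Int := ([2, 5], [3, 4], 10)

def Spec_solution (diffs : List Int) (times : List Int) (limit : Int) (out : Int) : Prop :=
  out = solution_alt diffs times limit
instance (diffs : List Int) (times : List Int) (limit : Int) (out : Int) : Decidable (Spec_solution diffs times limit out) := by
  unfold Spec_solution; infer_instance

-- ===== CLAIM (what is proved, stated in full; the proofs are below) =====
def Claim_equal_solution : Prop := ∀ (diffs : List Int) (times : List Int) (limit : Int), Dom_solution diffs times limit → Pre_solution diffs times limit → Spec_solution diffs times limit (solution diffs times limit)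

-- ===== LEMMAS AND PROOFS =====

-- suffix-sum abbreviations (proof-only helpers)
def sufW (l : List (Int × Int)) : Int := (l.map Prod.snd).sum
def sufDW (l : List (Int × Int)) : Int := (l.map (fun p => p.1 * p.2)).sum

lemma altSuff_getD (l : List (Int × Int)) (k : Nat) (hk : k ≤ l.length) :
    (altSuff l).getD k (0, 0) = (sufW (l.drop k), sufDW (l.drop k)) := by
  induction l generalizing k with
  | nil =>
    have : k = 0 := by simpa using hk
    subst this
    simp [altSuff, sufW, sufDW]
  | cons p rest ih =>
    obtain ⟨d, w⟩ := p
    have hhead : (altSuff rest).headI = (sufW rest, sufDW rest) := by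
      have h0 := ih 0 (Nat.zero_le _)
      cases hrest : altSuff rest with
      | nil => exact absurd hrest (by cases rest with
          | nil => simp [altSuff]
          | cons q t => cases q; simp [altSuff])
      | cons a t => simpa [hrest] using h0
    cases k with
    | zero =>
      simp [altSuff, hhead, sufW, sufDW]
      constructor <;> ring
    | succ k =>
      simp only [altSuff, List.getD_cons_succ, List.drop_succ_cons]
      exact ih k (by simpa using hk)

lemma pairwise_getD_mono (ds : List Int) (hs : ds.Pairwise (· ≤ ·)) (i j : Nat)
    (hij : i ≤ j) (hj : j < ds.length) : ds.getD i 0 ≤ ds.getD j 0 := by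
  rcases Nat.eq_or_lt_of_le hij with rfl | hlt
  · rfl
  · have := (List.pairwise_iff_getElem (R := (· ≤ · : Int → Int → Prop))).1 hs i j (by omega) hj hlt
    simpa [List.getD_eq_getElem?_getD, List.getElem?_eq_getElem, hj, show i < ds.length by omega] using this

lemma altBisect_spec (ds : List Int) (level : Int) (fuel lo hi : Nat)
    (hfuel : hi - lo ≤ fuel)
    (hhi : hi ≤ ds.length) (hlohi : lo ≤ hi)
    (hs : ds.Pairwise (· ≤ ·))
    (hlo : ∀ j, j < lo → ds.getD j 0 ≤ level)
    (hup : ∀ j, hi ≤ j → j < ds.length → level < ds.getD j 0) :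
    (∀ j, j < altBisect ds level fuel lo hi → ds.getD j 0 ≤ level) ∧
    (∀ j, altBisect ds level fuel lo hi ≤ j → j < ds.length → level < ds.getD j 0) ∧
    altBisect ds level fuel lo hi ≤ ds.length := by
  induction fuel generalizing lo hi with
  | zero =>
    have : lo = hi := by omega
    subst this
    simp only [altBisect]
    exact ⟨hlo, fun j hj hjl => hup j hj hjl, by omega⟩
  | succ fuel ih =>
    by_cases h : lo < hi
    · simp only [altBisect, if_pos h]
      set m := (lo + hi) / 2 with hm
      have hmlo : lo ≤ m := by omega
      have hmhi : m < hi := by omega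
      have hmlen : m < ds.length := by omega
      have hgetd : PySem.List.pyGetD ds (m : Int) 0 = ds.getD m 0 := by
        simp [PySem.List.pyGetD_natCast]
      by_cases hgt : PySem.List.pyGetD ds (m : Int) 0 > level
      · rw [if_pos hgt]
        refine ih lo m (by omega) (by omega) (by omega) hlo ?_
        intro j hmj hjlen
        calc level < ds.getD m 0 := by rw [← hgetd]; exact hgt
          _ ≤ ds.getD j 0 := pairwise_getD_mono ds hs m j hmj hjlen
      · rw [if_neg hgt]
        refine ih (m + 1) hi (by omega) hhi (by omega) ?_ hup
        intro j hj
        have hjm : j ≤ m := by omega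
        calc ds.getD j 0 ≤ ds.getD m 0 := pairwise_getD_mono ds hs j m hjm hmlen
          _ ≤ level := by rw [← hgetd]; omega
    · simp only [altBisect, if_neg h]
      have : lo = hi := by omega
      subst this
      exact ⟨hlo, fun j hj hjl => hup j hj hjl, by omega⟩

lemma sum_map_sub_int {α : Type} (l : List α) (f g : α → Int) :
    (l.map (fun x => f x - g x)).sum = (l.map f).sum - (l.map g).sum := by
  induction l with
  | nil => simp
  | cons x t ih => simp [ih]; ring

lemma map_getD_range_eq_take (xs : List Int) (n : Nat) (hn : n ≤ xs.length) :
    (List.range n).map (fun k => xs.getD k 0) = xs.take n := by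
  apply List.ext_getElem
  · simp [hn]
  · intro i h1 h2
    simp at h1 ⊢
    rw [List.getElem?_eq_getElem (by omega)]
    simp

lemma w_eq (times : List Int) (k : Nat) :
    (if ((k : Int)) > 0 then PySem.List.pyGetD times ((k : Int) - 1) 0 else 0)
      = (0 :: times).getD k 0 := by
  cases k with
  | zero => simp
  | succ k =>
    have : ((k + 1 : Nat) : Int) - 1 = (k : Int) := by push_cast; ring
    rw [if_pos (by positivity), this, PySem.List.pyGetD_natCast]
    simp

def G (level : Int) (l : List (Int × Int)) : Int :=
  (l.map (fun p => if level < p.1 then (p.1 - level) * p.2 else 0)).sum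

lemma solution2_eq_G (diffs times : List Int) (limit level : Int)
    (hlen : diffs.length ≤ times.length) :
    solution2 diffs times limit level
      = (times.take diffs.length).sum
        + G level ((PySem.List.enumerate diffs 0).map (fun p =>
            (p.2, (if p.1 > 0 then PySem.List.pyGetD times (p.1 - 1) 0 else 0) +
                  PySem.List.pyGetD times p.1 0))) := by
  unfold solution2 G
  rw [PySem.List.enumerate_eq_map_pyRange diffs 0]
  have hlen' : PySem.List.len diffs = (diffs.length : Int) := by
    simp [PySem.List.len]
  rw [hlen', PySem.List.pyRange_zero_natCast, List.foldl_map, List.map_map, List.map_map]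
  set n := diffs.length with hn
  rw [PySem.List.foldl_congr_mem (List.range n)
      _
      (fun count k => count + (times.getD k 0 +
        (if level < diffs.getD k 0
         then (diffs.getD k 0 - level) * ((0 :: times).getD k 0 + times.getD k 0) else 0))) 0
      ?_]
  · rw [PySem.List.foldl_add, PySem.List.sum_map_add_int, map_getD_range_eq_take times n hlen,
       zero_add]
    congr 1
    simp only [List.map_map]
    refine congrArg List.sum (List.map_congr_left ?_)
    intro k hk
    simp only [Function.comp_apply]
    rw [w_eq times k]
    simp only [PySem.List.pyGetD_natCast]
  · intro acc k hk
    rw [show ((k : Int) + 1) = ((k + 1 : Nat) : Int) by push_cast; ring]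
    simp only [PySem.List.pyGetD_natCast, List.getD_cons_succ]
    split_ifs with h1
    · ring
    · ring

lemma G_perm (level : Int) {l l' : List (Int × Int)} (h : l.Perm l') : G level l = G level l' := by
  unfold G
  exact (h.map _).sum_eq

lemma cost_eq (diffs times : List Int) (limit level : Int)
    (hlen : diffs.length ≤ times.length) :
    altCost ((altPairs diffs times).map (fun p => p.1)) (altSuff (altPairs diffs times))
      ((times.take diffs.length).sum) diffs.length level
      = solution2 diffs times limit level := by
  set pairs := altPairs diffs times with hpairs
  set ds := pairs.map (fun p => p.1) with hds
  have hplen : pairs.length = diffs.length := by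
    simp [hpairs, altPairs, PySem.List.length_sorted, PySem.List.length_enumerate]
  have hdlen : ds.length = diffs.length := by simp [hds, hplen]
  have hsort : ds.Pairwise (· ≤ ·) := by
    have := PySem.List.sorted_pairwise
      ((PySem.List.enumerate diffs 0).map (fun p =>
        (p.2, (if p.1 > 0 then PySem.List.pyGetD times (p.1 - 1) 0 else 0) +
              PySem.List.pyGetD times p.1 0))) (fun p => p.1)
    exact List.Pairwise.map _ (fun a b h => h) this
  obtain ⟨hbelow, habove, hrlen⟩ :=
    altBisect_spec ds level diffs.length 0 diffs.length (by omega) (by omega) (by omega) hsort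
      (by omega) (by intro j hj hjl; omega)
  set r := altBisect ds level diffs.length 0 diffs.length with hr
  simp only [altCost]
  rw [← hr, PySem.List.pyGetD_natCast,
      altSuff_getD pairs r (by omega)]
  rw [solution2_eq_G diffs times limit level hlen]
  have hperm : pairs.Perm ((PySem.List.enumerate diffs 0).map (fun p =>
      (p.2, (if p.1 > 0 then PySem.List.pyGetD times (p.1 - 1) 0 else 0) +
            PySem.List.pyGetD times p.1 0))) := PySem.List.sorted_perm _ _ _
  rw [← G_perm level hperm]
  have htake : G level (pairs.take r) = 0 := by
    unfold G
    apply List.sum_eq_zero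
    intro x hx
    simp only [List.mem_map] at hx
    obtain ⟨p, hp, rfl⟩ := hx
    obtain ⟨j, hj, hpj⟩ := List.getElem_of_mem hp
    have hjr : j < r := by have := List.length_take_le r pairs; omega
    have : p.1 = ds.getD j 0 := by
      rw [List.getElem_take] at hpj
      rw [← hpj, hds, List.getD_eq_getElem?_getD]
      rw [List.getElem?_map, List.getElem?_eq_getElem (by omega)]
      simp
    rw [if_neg (by rw [this]; exact not_lt.mpr (hbelow j hjr))]
  have hdrop : G level (pairs.drop r) = sufDW (pairs.drop r) - level * sufW (pairs.drop r) := by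
    unfold G sufDW sufW
    rw [List.map_congr_left (g := fun p => p.1 * p.2 - level * p.2) ?_]
    · rw [sum_map_sub_int, List.sum_map_mul_left]
    · intro p hp
      obtain ⟨j, hj, hpj⟩ := List.getElem_of_mem hp
      have hlendrop : (pairs.drop r).length = pairs.length - r := by simp
      have hq : p.1 = ds.getD (r + j) 0 := by
        rw [List.getElem_drop] at hpj
        rw [← hpj, hds, List.getD_eq_getElem?_getD]
        rw [List.getElem?_map, List.getElem?_eq_getElem (by omega)]
        simp
      have : level < p.1 := by rw [hq]; exact habove (r + j) (by omega) (by omega)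
      rw [if_pos this]
      ring
  have hG : G level pairs = G level (pairs.take r) + G level (pairs.drop r) := by
    unfold G
    rw [← List.sum_append, ← List.map_append, List.take_append_drop]
  rw [hG, htake, hdrop]
  simp only []
  ring

lemma loops_eq (diffs times : List Int) (limit : Int)
    (hlen : diffs.length ≤ times.length) :
    ∀ (fuel : Nat) (lo hi ans : Int), (hi - lo + 1).toNat ≤ fuel → (ans = 0 ∨ hi < ans) →
      solutionLoop diffs times limit fuel lo hi ans =
      altSearch ((altPairs diffs times).map (fun p => p.1)) (altSuff (altPairs diffs times))
        ((times.take diffs.length).sum) diffs.length limit fuel lo hi ans := by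
  intro fuel
  induction fuel with
  | zero =>
    intro lo hi ans hN hinv
    simp only [solutionLoop, altSearch]
  | succ fuel ih =>
    intro lo hi ans hN hinv
    by_cases h : lo ≤ hi
    · simp only [solutionLoop, altSearch, if_pos h]
      set m := PySem.Int.floordiv (lo + hi) 2 with hm
      have hmb := PySem.Int.floordiv_two_mid_bounds h
      have hc := cost_eq diffs times limit m hlen
      by_cases hcnt : solution2 diffs times limit m ≤ limit
      · rw [if_pos ⟨hcnt, by rcases hinv with h0 | h0 <;> omega⟩,
            if_pos (by rw [hc]; exact hcnt)]
        exact ih lo (m - 1) m (by omega) (Or.inr (by omega))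
      · rw [if_neg (fun hcond => hcnt hcond.1), if_neg (by rw [hc]; exact hcnt)]
        exact ih (m + 1) hi ans (by omega) hinv
    · simp only [solutionLoop, altSearch, if_neg h]

-- ===== VERDICT (by name: the statement is the Claim_ definition above) =====
theorem solution_spec : Claim_equal_solution := by
  intro diffs times limit _hDom hPre
  unfold Spec_solution solution solution_alt
  exact loops_eq diffs times limit hPre.2 _ _ _ _ (le_refl _) (Or.inl rfl)
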